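-- pv_equiv track=rewrite | github.com/ERIS-GIS/GIS-Dev | US_Imagery/Generate_SeamlessMap_Mosaic.py | get_year
-- ===== SOURCE A (Python) =====
-- def get_year(filename,netpath):
--     x = netpath.split('\\')
--     years = ['2000','2001','2002','2003','2004','2005','2006','2007','2008','2009','2010','2011','2012','2013','2014','2015','2016','2017','2018','2019']
--     no_years = ['199x','200x','201x']
--     for item in x:
--         if item in years:
--             return item
--             break
--     # if item is not in the years list
--     for item in x:
--         if item in no_years:
--              return item
-- ===== SOURCE B (Python) =====
-- def get_year(filename, netpath):
--     years = ['2000','2001','2002','2003','2004','2005','2006','2007','2008','2009','2010','2011','2012','2013','2014','2015','2016','2017','2018','2019']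
--     no_years = ['199x','200x','201x']
--     fallback = None
--     for item in netpath.split('\\'):
--         if item in years:
--             return item
--         if fallback is None and item in no_years:
--             fallback = item
--     return fallback
-- ===== Notes on version B (the rewrite author's own statement) =====
-- stated objective: simpler
-- what changed: Replaces A's two sequential scans of the split tokens by one pass that returns a year immediately and remembers the first wildcard token as a fallback returned after the loop.
import Mathlib
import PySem

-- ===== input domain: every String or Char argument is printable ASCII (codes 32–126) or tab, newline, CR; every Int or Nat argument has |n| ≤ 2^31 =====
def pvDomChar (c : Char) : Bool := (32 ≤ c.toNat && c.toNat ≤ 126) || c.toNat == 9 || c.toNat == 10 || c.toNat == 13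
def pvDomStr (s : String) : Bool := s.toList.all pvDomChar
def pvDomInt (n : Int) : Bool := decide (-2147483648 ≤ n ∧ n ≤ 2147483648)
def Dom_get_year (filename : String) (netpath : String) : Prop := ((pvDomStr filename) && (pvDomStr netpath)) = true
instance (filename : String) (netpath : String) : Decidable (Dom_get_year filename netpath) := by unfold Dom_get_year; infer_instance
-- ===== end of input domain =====

-- B merges A's two sequential scans of the split tokens into one pass that returns a
-- year immediately and remembers the first wildcard token as a fallback (objective: simpler).

def pvYears : List String := ["2000","2001","2002","2003","2004","2005","2006","2007","2008","2009","2010","2011","2012","2013","2014","2015","2016","2017","2018","2019"]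
def pvNoYears : List String := ["199x","200x","201x"]

-- ===== PORT A =====
-- first loop: return the first token in years
def getYearLoop1 (x : List String) : Option String :=
  match x with
  | [] => none
  | item :: rest => if item ∈ pvYears then some item else getYearLoop1 rest

-- second loop: return the first token in no_years
def getYearLoop2 (x : List String) : Option String :=
  match x with
  | [] => none
  | item :: rest => if item ∈ pvNoYears then some item else getYearLoop2 rest

def get_year (filename : String) (netpath : String) : Option String :=
  let x := (PySem.Str.split? netpath "\\").getD []
  match getYearLoop1 x with
  | some y => some y
  | none => getYearLoop2 x

-- ===== PORT B =====
-- single pass with a remembered fallback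
def getYearAltLoop (x : List String) (fallback : Option String) : Option String :=
  match x with
  | [] => fallback
  | item :: rest =>
      if item ∈ pvYears then some item
      else if fallback = none ∧ item ∈ pvNoYears then getYearAltLoop rest (some item)
      else getYearAltLoop rest fallback

def get_year_alt (filename : String) (netpath : String) : Option String :=
  getYearAltLoop ((PySem.Str.split? netpath "\\").getD []) none

-- ===== PRECONDITION & SPEC =====
def Spec_get_year (filename : String) (netpath : String) (out : Option String) : Prop := out = get_year_alt filename netpath
instance (filename : String) (netpath : String) (out : Option String) : Decidable (Spec_get_year filename netpath out) := by unfold Spec_get_year; infer_instance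

-- ===== CLAIM (what is proved, stated in full; the proofs are below) =====
def Claim_equal_get_year : Prop := ∀ (filename : String) (netpath : String), Dom_get_year filename netpath → Spec_get_year filename netpath (get_year filename netpath)

-- ===== LEMMAS AND PROOFS =====

-- B's loop with accumulator: year first, else the accumulator, else the first no_year.
theorem getYearAltLoop_eq (x : List String) (fallback : Option String) :
    getYearAltLoop x fallback =
      match getYearLoop1 x with
      | some y => some y
      | none => match fallback with
                | some f => some f
                | none => getYearLoop2 x := by
  induction x generalizing fallback with
  | nil => cases fallback <;> simp [getYearAltLoop, getYearLoop1, getYearLoop2]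
  | cons item rest ih =>
      by_cases hy : item ∈ pvYears
      · simp [getYearAltLoop, getYearLoop1, hy]
      · by_cases hn : item ∈ pvNoYears
        · cases fallback with
          | none =>
              simp [getYearAltLoop, getYearLoop1, getYearLoop2, hy, hn, ih]
          | some f =>
              simp [getYearAltLoop, getYearLoop1, getYearLoop2, hy, hn, ih]
        · cases fallback with
          | none =>
              simp [getYearAltLoop, getYearLoop1, getYearLoop2, hy, hn, ih]
          | some f =>
              simp [getYearAltLoop, getYearLoop1, hy, hn, ih]

-- ===== VERDICT (by name: the statement is the Claim_ definition above) =====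
theorem get_year_spec : Claim_equal_get_year := by
  intro filename netpath _
  unfold Spec_get_year get_year get_year_alt
  rw [getYearAltLoop_eq]
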